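-- pv_equiv track=rewrite | github.com/chenyutcmn/leetcode_record | leetcode/2019.4.14/Trapping Rain Water.py | find_indx
-- ===== SOURCE A (Python) =====
-- def find_indx(height , beg , end):
--     temp = min(height[beg] , height[end])
--     indx = -1
--     for i in range(beg + 1 , end):
--         if height[i] > temp:
--             temp = height[i]
--             indx = i
--     return indx
-- ===== SOURCE B (Python) =====
-- def find_indx(height, beg, end):
--     temp = min(height[beg], height[end])
--     m = temp
--     for i in range(beg + 1, end):
--         m = max(m, height[i])
--     if m == temp:
--         return -1
--     return next(i for i in range(beg + 1, end) if height[i] == m)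
-- ===== Notes on version B (the rewrite author's own statement) =====
-- stated objective: alternative
-- what changed: Single pass maintaining a (running max, last-update index) pair is replaced by two decoupled passes: one computing only the range maximum, then a first-occurrence search for it (first index of the max iff it exceeds the endpoint threshold).
import Mathlib
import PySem

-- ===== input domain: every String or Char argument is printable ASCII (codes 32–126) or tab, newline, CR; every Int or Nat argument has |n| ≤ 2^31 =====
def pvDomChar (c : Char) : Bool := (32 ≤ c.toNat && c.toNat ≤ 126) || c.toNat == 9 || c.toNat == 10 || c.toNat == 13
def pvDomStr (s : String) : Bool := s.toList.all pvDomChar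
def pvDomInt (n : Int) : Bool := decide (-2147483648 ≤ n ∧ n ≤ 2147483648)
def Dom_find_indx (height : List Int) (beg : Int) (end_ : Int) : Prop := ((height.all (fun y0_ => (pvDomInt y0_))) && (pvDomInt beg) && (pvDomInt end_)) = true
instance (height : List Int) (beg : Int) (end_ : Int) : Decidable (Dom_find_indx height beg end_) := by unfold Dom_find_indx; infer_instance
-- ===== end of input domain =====

-- B replaces A's single pass carrying a (running max, last-update index) pair by two
-- decoupled passes: compute the range maximum, then find its first occurrence (alternative,
-- same cost).

-- ===== PORT A =====
-- one pass: state (temp, indx); update on strict increase (pyGetD is safe under Pre_)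
def find_indx (height : List Int) (beg : Int) (end_ : Int) : Int :=
  let temp := min (PySem.List.pyGetD height beg 0) (PySem.List.pyGetD height end_ 0)
  ((PySem.List.pyRange (beg + 1) end_ 1).foldl
    (fun (s : Int × Int) i =>
      if PySem.List.pyGetD height i 0 > s.1 then (PySem.List.pyGetD height i 0, i) else s)
    (temp, -1)).2

-- ===== PORT B =====
-- pass 1: range maximum starting from the endpoint threshold; pass 2: first index attaining it
-- (the `next(...)` generator is ported as List.find?; its fallback -1 is unreachable under Pre_)
def find_indx_alt (height : List Int) (beg : Int) (end_ : Int) : Int :=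
  let temp := min (PySem.List.pyGetD height beg 0) (PySem.List.pyGetD height end_ 0)
  let m := (PySem.List.pyRange (beg + 1) end_ 1).foldl
    (fun acc i => max acc (PySem.List.pyGetD height i 0)) temp
  if m = temp then -1
  else ((PySem.List.pyRange (beg + 1) end_ 1).find?
          (fun i => PySem.List.pyGetD height i 0 = m)).getD (-1)

-- ===== PRECONDITION & SPEC =====
-- Pre_ excludes exactly the inputs on which Python A raises IndexError: height[beg],
-- height[end] and every height[i] for i in range(beg+1, end) must be valid Python indices.
def Pre_find_indx (height : List Int) (beg : Int) (end_ : Int) : Prop :=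
  PySem.Raise.InRange height.length beg ∧ PySem.Raise.InRange height.length end_ ∧
  (beg + 1 < end_ → (-(height.length : Int) ≤ beg + 1 ∧ end_ - 1 < (height.length : Int)))
instance (height : List Int) (beg : Int) (end_ : Int) : Decidable (Pre_find_indx height beg end_) := by unfold Pre_find_indx; infer_instance

def pvWitness_find_indx : List Int × Int × Int := ([2, 0, 3, 1, 2], 0, 4)

def Spec_find_indx (height : List Int) (beg : Int) (end_ : Int) (out : Int) : Prop := out = find_indx_alt height beg end_
instance (height : List Int) (beg : Int) (end_ : Int) (out : Int) : Decidable (Spec_find_indx height beg end_ out) := by unfold Spec_find_indx; infer_instance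

-- ===== CLAIM (what is proved, stated in full; the proofs are below) =====
def Claim_equal_find_indx : Prop := ∀ (height : List Int) (beg : Int) (end_ : Int), Dom_find_indx height beg end_ → Pre_find_indx height beg end_ → Spec_find_indx height beg end_ (find_indx height beg end_)

-- ===== LEMMAS AND PROOFS =====

-- the running max never decreases below its start
theorem foldMax_ge (g : Int → Int) (r : List Int) (t : Int) :
    t ≤ r.foldl (fun acc i => max acc (g i)) t := by
  induction r generalizing t with
  | nil => simp
  | cons i r ih => exact le_trans (le_max_left t (g i)) (ih (max t (g i)))

-- the running max is either the start value or attained by some element of the list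
theorem foldMax_attained (g : Int → Int) (r : List Int) (t : Int) :
    r.foldl (fun acc i => max acc (g i)) t = t ∨
      ∃ i ∈ r, g i = r.foldl (fun acc i => max acc (g i)) t := by
  induction r generalizing t with
  | nil => exact Or.inl rfl
  | cons i r ih =>
    rcases ih (max t (g i)) with h | ⟨i', hi', hg⟩
    · simp only [List.foldl_cons, h]
      rcases le_total (g i) t with hle | hle
      · exact Or.inl (max_eq_left hle)
      · exact Or.inr ⟨i, List.mem_cons_self, (max_eq_right hle).symm⟩
    · exact Or.inr ⟨i', List.mem_cons_of_mem _ hi', hg⟩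

-- A's one-pass fold equals: (range max, first index attaining it — or j if nothing exceeded t)
theorem loop_eq (g : Int → Int) (r : List Int) (t j : Int) :
    (r.foldl (fun (s : Int × Int) i => if g i > s.1 then (g i, i) else s) (t, j)) =
      (r.foldl (fun acc i => max acc (g i)) t,
       if r.foldl (fun acc i => max acc (g i)) t = t then j
       else (r.find? (fun i => g i = r.foldl (fun acc i => max acc (g i)) t)).getD j) := by
  induction r generalizing t j with
  | nil => simp
  | cons i r ih =>
    simp only [List.foldl_cons, List.find?_cons]
    by_cases h : g i > t
    · have hmax : max t (g i) = g i := max_eq_right h.le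
      rw [if_pos h, ih (g i) i]; simp only [hmax]
      have hm := foldMax_ge g r (g i)
      set m := r.foldl (fun acc i => max acc (g i)) (g i) with hmdef
      have hmt : ¬ m = t := by omega
      rw [if_neg hmt]
      by_cases he : g i = m
      · simp [he]
      · have hne : ¬ m = g i := fun hh => he hh.symm
        rw [if_neg hne, decide_eq_false he]
        rcases foldMax_attained g r (g i) with h0 | ⟨i', hi', hg⟩
        · exact absurd (hmdef.trans h0) hne
        · have hfind : r.find? (fun i => decide (g i = m)) ≠ none := by
            intro hnone
            have hne' : g i' ≠ m := by simpa using List.find?_eq_none.mp hnone i' hi'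
            exact hne' (hg.trans hmdef.symm)
          rcases Option.ne_none_iff_exists'.mp hfind with ⟨v, hv⟩
          simp [hv]
    · have hmax : max t (g i) = t := max_eq_left (by omega)
      rw [if_neg h, ih t j]; simp only [hmax]
      set m := r.foldl (fun acc i => max acc (g i)) t with hmdef
      by_cases hmt : m = t
      · simp [hmt]
      · have hm := foldMax_ge g r t
        have hgi : ¬ g i = m := by omega
        rw [if_neg hmt, if_neg hmt, decide_eq_false hgi]

-- ===== VERDICT (by name: the statement is the Claim_ definition above) =====
theorem find_indx_spec : Claim_equal_find_indx := by
  intro height beg end_ _ _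
  unfold Spec_find_indx find_indx find_indx_alt
  simp only [loop_eq]
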